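-- pv_equiv track=rewrite | github.com/FLOPBench/SC26FLOPBench | gpuFLOPBench-agentic/langchain-tools/code-search-tools/utils.py | _find_first_special_char
-- ===== SOURCE A (Python) =====
-- from typing import Iterable, Iterator, Optional, Tuple
--
-- def _skip_string(text: str, idx: int) -> Optional[int]:
--     quote = text[idx]
--     i = idx + 1
--     length = len(text)
--     while i < length:
--         if text[i] == "\\":
--             i += 2
--             continue
--         if text[i] == quote:
--             return i + 1
--         i += 1
--     return None
--
-- def _find_first_special_char(text: str, idx: int) -> Optional[int]:
--     i = idx
--     length = len(text)
--     while i < length: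
--         ch = text[i]
--         if ch == "/" and i + 1 < length:
--             if text[i + 1] == "/":
--                 newline = text.find("\n", i + 2)
--                 i = newline if newline != -1 else length
--                 continue
--             if text[i + 1] == "*":
--                 end = text.find("*/", i + 2)
--                 if end == -1:
--                     return None
--                 i = end + 2
--                 continue
--         if ch in {"\"", "'"}:
--             i = _skip_string(text, i)
--             if i is None:
--                 return None
--             continue
--         if ch in {";", "{"}:
--             return i
--         i += 1
--     return None
-- ===== SOURCE B (Python) =====
-- from typing import Optional
--
-- _NORMAL, _STRING, _LINE, _BLOCK = 0, 1, 2, 3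
--
-- def _find_first_special_char(text: str, idx: int) -> Optional[int]:
--     # Flat single-pass state machine: one cursor, one explicit mode variable,
--     # no helper calls and no .find() jumps.
--     state = _NORMAL
--     quote = ""
--     i = idx
--     length = len(text)
--     while i < length:
--         ch = text[i]
--         if state == _NORMAL:
--             if ch == "/" and i + 1 < length and text[i + 1] == "/":
--                 state = _LINE
--                 i += 2
--             elif ch == "/" and i + 1 < length and text[i + 1] == "*":
--                 state = _BLOCK
--                 i += 2
--             elif ch in ";{":
--                 return i
--             elif ch in "\"'":
--                 state = _STRING
--                 quote = ch
--                 i += 1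
--             else:
--                 i += 1
--         elif state == _STRING:
--             if ch == "\\":
--                 i += 2
--             elif ch == quote:
--                 state = _NORMAL
--                 i += 1
--             else:
--                 i += 1
--         elif state == _LINE:
--             if ch == "\n":
--                 state = _NORMAL
--             i += 1
--         else:  # _BLOCK
--             if ch == "*" and i + 1 < length and text[i + 1] == "/":
--                 state = _NORMAL
--                 i += 2
--             else:
--                 i += 1
--     return None
-- ===== Notes on version B (the rewrite author's own statement) =====
-- stated objective: alternative
-- what changed: Replaced A's jump-based scanner (a _skip_string helper plus text.find() jumps over comments) by one flat character-at-a-time loop with an explicit mode variable (NORMAL/STRING/LINE_COMMENT/BLOCK_COMMENT); same O(n) cost, no helper calls and no substring searches.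
-- outside the precondition, e.g. on _find_first_special_char('//\n;', -4): A returns 3, B returns -1
import Mathlib
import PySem

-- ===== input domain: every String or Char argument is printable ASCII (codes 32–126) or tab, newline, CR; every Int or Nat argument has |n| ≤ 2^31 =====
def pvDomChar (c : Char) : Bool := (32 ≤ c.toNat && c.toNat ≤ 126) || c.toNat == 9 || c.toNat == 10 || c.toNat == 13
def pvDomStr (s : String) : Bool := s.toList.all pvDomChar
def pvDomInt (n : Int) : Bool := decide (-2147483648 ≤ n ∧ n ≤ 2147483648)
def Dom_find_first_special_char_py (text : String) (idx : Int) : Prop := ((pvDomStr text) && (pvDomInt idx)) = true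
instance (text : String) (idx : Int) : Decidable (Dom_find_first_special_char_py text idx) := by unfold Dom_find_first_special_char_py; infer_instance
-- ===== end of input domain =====

-- B replaces A's helper-call + .find()-jump scanner by a single flat state machine
-- (NORMAL/STRING/LINE/BLOCK) advancing one character at a time; equal return value on
-- every non-negative start index (Pre_), proved below.

-- ===== PORT A =====
-- the while-loop of _skip_string; the Nat argument is fuel that merely totalizes the
-- loop (the cursor strictly increases, so length+1 steps always suffice under Pre_)
def skipLoopA (cs : List Char) : Nat → Char → Int → Option Int
  | 0, _, _ => none
  | fuel + 1, q, i =>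
    if i < (cs.length : Int) then
      if PySem.List.pyGetD cs i ' ' = '\\' then skipLoopA cs fuel q (i + 2)
      else if PySem.List.pyGetD cs i ' ' = q then some (i + 1)
      else skipLoopA cs fuel q (i + 1)
    else none

-- _skip_string; Python raises IndexError when text[idx] is out of range (never reached
-- from _find_first_special_char, which just read text[idx]); the port returns none there
def skipStringA (cs : List Char) (fuel : Nat) (idx : Int) : Option Int :=
  match PySem.List.pyGet? cs idx with
  | none => none
  | some q => skipLoopA cs fuel q (idx + 1)

-- the while-loop of _find_first_special_char, same fuel device
def findA (cs : List Char) : Nat → Int → Option Int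
  | 0, _ => none
  | fuel + 1, i =>
    if i < (cs.length : Int) then
      if PySem.List.pyGetD cs i ' ' = '/' ∧ i + 1 < (cs.length : Int) ∧ PySem.List.pyGetD cs (i + 1) ' ' = '/' then
        findA cs fuel (if PySem.Chars.findFrom cs ['\n'] (i + 2) ≠ -1 then PySem.Chars.findFrom cs ['\n'] (i + 2) else (cs.length : Int))
      else if PySem.List.pyGetD cs i ' ' = '/' ∧ i + 1 < (cs.length : Int) ∧ PySem.List.pyGetD cs (i + 1) ' ' = '*' then
        if PySem.Chars.findFrom cs ['*', '/'] (i + 2) = -1 then none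
        else findA cs fuel (PySem.Chars.findFrom cs ['*', '/'] (i + 2) + 2)
      else if PySem.List.pyGetD cs i ' ' = '"' ∨ PySem.List.pyGetD cs i ' ' = '\'' then
        match skipStringA cs fuel i with
        | none => none
        | some j => findA cs fuel j
      else if PySem.List.pyGetD cs i ' ' = ';' ∨ PySem.List.pyGetD cs i ' ' = '{' then some i
      else findA cs fuel (i + 1)
    else none

def find_first_special_char_py (text : String) (idx : Int) : Option Int :=
  findA text.toList (text.toList.length + 1) idx

-- ===== PORT B =====
-- the single while-loop of B's state machine: st = 0 NORMAL, 1 STRING, 2 LINE, 3 BLOCK;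
-- same fuel device (the cursor strictly increases each iteration)
def loopB (cs : List Char) : Nat → Nat → Char → Int → Option Int
  | 0, _, _, _ => none
  | fuel + 1, st, q, i =>
    if i < (cs.length : Int) then
      if st = 0 then
        if PySem.List.pyGetD cs i ' ' = '/' ∧ i + 1 < (cs.length : Int) ∧ PySem.List.pyGetD cs (i + 1) ' ' = '/' then
          loopB cs fuel 2 q (i + 2)
        else if PySem.List.pyGetD cs i ' ' = '/' ∧ i + 1 < (cs.length : Int) ∧ PySem.List.pyGetD cs (i + 1) ' ' = '*' then
          loopB cs fuel 3 q (i + 2)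
        else if PySem.List.pyGetD cs i ' ' = ';' ∨ PySem.List.pyGetD cs i ' ' = '{' then some i
        else if PySem.List.pyGetD cs i ' ' = '"' ∨ PySem.List.pyGetD cs i ' ' = '\'' then
          loopB cs fuel 1 (PySem.List.pyGetD cs i ' ') (i + 1)
        else loopB cs fuel 0 q (i + 1)
      else if st = 1 then
        if PySem.List.pyGetD cs i ' ' = '\\' then loopB cs fuel 1 q (i + 2)
        else if PySem.List.pyGetD cs i ' ' = q then loopB cs fuel 0 q (i + 1)
        else loopB cs fuel 1 q (i + 1)
      else if st = 2 then
        if PySem.List.pyGetD cs i ' ' = '\n' then loopB cs fuel 0 q (i + 1)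
        else loopB cs fuel 2 q (i + 1)
      else
        if PySem.List.pyGetD cs i ' ' = '*' ∧ i + 1 < (cs.length : Int) ∧ PySem.List.pyGetD cs (i + 1) ' ' = '/' then
          loopB cs fuel 0 q (i + 2)
        else loopB cs fuel 3 q (i + 1)
    else none

def find_first_special_char_py_alt (text : String) (idx : Int) : Option Int :=
  loopB text.toList (text.toList.length + 1) 0 ' ' idx

-- ===== PRECONDITION & SPEC =====
-- Pre_ restricts to the function's natural domain, non-negative start positions: for idx < 0
-- Python's negative indexing makes A scan with wrap-around from the string's end, outside
-- the scanner's purpose, and B's forward state machine is not obliged to mimic it.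
def Pre_find_first_special_char_py (text : String) (idx : Int) : Prop := 0 ≤ idx
instance (text : String) (idx : Int) : Decidable (Pre_find_first_special_char_py text idx) := by unfold Pre_find_first_special_char_py; infer_instance
def pvWitness_find_first_special_char_py : String × Int := ("a;", 0)

def Spec_find_first_special_char_py (text : String) (idx : Int) (out : Option Int) : Prop := out = find_first_special_char_py_alt text idx
instance (text : String) (idx : Int) (out : Option Int) : Decidable (Spec_find_first_special_char_py text idx out) := by unfold Spec_find_first_special_char_py; infer_instance

-- ===== CLAIM (what is proved, stated in full; the proofs are below) =====
def Claim_equal_find_first_special_char_py : Prop := ∀ (text : String) (idx : Int), Dom_find_first_special_char_py text idx → Pre_find_first_special_char_py text idx → Spec_find_first_special_char_py text idx (find_first_special_char_py text idx)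

-- ===== LEMMAS AND PROOFS =====

-- singleton / pair prefixes of a drop, in getElem? form
theorem pvPrefixOne {cs : List Char} {a : Char} {k : Nat} : ([a] <+: cs.drop k) ↔ cs[k]? = some a := by
  by_cases hk : k < cs.length
  · rw [List.drop_eq_getElem_cons hk, List.getElem?_eq_getElem hk, Option.some_inj,
      List.cons_prefix_cons]
    exact ⟨fun h => h.1.symm, fun h => ⟨h.symm, List.nil_prefix⟩⟩
  · have h1 : cs.drop k = [] := List.drop_eq_nil_of_le (by omega)
    have h2 : cs[k]? = none := List.getElem?_eq_none (by omega)
    rw [h1, h2]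
    simp

theorem pvPrefixTwo {cs : List Char} {a b : Char} {k : Nat} :
    ([a, b] <+: cs.drop k) ↔ (cs[k]? = some a ∧ cs[k + 1]? = some b) := by
  by_cases hk : k < cs.length
  · rw [List.drop_eq_getElem_cons hk, List.getElem?_eq_getElem hk, Option.some_inj,
      List.cons_prefix_cons, pvPrefixOne]
    exact ⟨fun h => ⟨h.1.symm, h.2⟩, fun h => ⟨h.1.symm, h.2⟩⟩
  · have h1 : cs.drop k = [] := List.drop_eq_nil_of_le (by omega)
    have h2 : cs[k]? = none := List.getElem?_eq_none (by omega)
    rw [h1, h2]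
    simp

-- findFrom is characterised by "first occurrence at or after k"
theorem pvFindFromUniq (cs sub : List Char) (k v : Nat) (hk : k ≤ cs.length) (hkv : k ≤ v)
    (hpre : sub <+: cs.drop v) (hmin : ∀ j, k ≤ j → j < v → ¬ sub <+: cs.drop j) :
    PySem.Chars.findFrom cs sub (k : Int) = (v : Int) := by
  have hinf : sub <:+: cs.drop k := by
    have h1 : cs.drop v = (cs.drop k).drop (v - k) := by
      rw [List.drop_drop]; congr 1; omega
    have h2 : sub <:+: cs.drop v := hpre.isInfix
    rw [h1] at h2
    exact h2.trans (List.drop_suffix _ _).isInfix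
  have hne : PySem.Chars.findFrom cs sub (k : Int) ≠ -1 := by
    rw [ne_eq, PySem.Chars.findFrom_natCast_eq_neg_one_iff cs sub k hk]
    simpa using hinf
  obtain ⟨hge, hpreF, hminF⟩ := PySem.Chars.findFrom_natCast_spec cs sub k hk hne
  set F := PySem.Chars.findFrom cs sub (k : Int) with hF
  have h0 : 0 ≤ F := le_trans (by positivity) hge
  have hkF : k ≤ F.toNat := by omega
  have hnotlt : ¬ (F.toNat < v) := fun h => hmin F.toNat hkF h hpreF
  have hnotgt : ¬ (v < F.toNat) := fun h => hminF v hkv h hpre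
  omega

theorem pvFindFromHit (cs sub : List Char) (k : Nat) (hk : k ≤ cs.length) (hpre : sub <+: cs.drop k) :
    PySem.Chars.findFrom cs sub (k : Int) = (k : Int) :=
  pvFindFromUniq cs sub k k hk le_rfl hpre (by omega)

theorem pvFindFromStep (cs sub : List Char) (k : Nat) (hk : k < cs.length) (hno : ¬ sub <+: cs.drop k) :
    PySem.Chars.findFrom cs sub (k : Int) = PySem.Chars.findFrom cs sub ((k : Int) + 1) := by
  have hk1 : k + 1 ≤ cs.length := by omega
  have hcast : ((k : Int) + 1) = ((k + 1 : Nat) : Int) := by push_cast; ring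
  rw [hcast]
  by_cases hF1 : PySem.Chars.findFrom cs sub ((k + 1 : Nat) : Int) = -1
  · rw [hF1, PySem.Chars.findFrom_natCast_eq_neg_one_iff cs sub k (by omega)]
    rw [PySem.Chars.findFrom_natCast_eq_neg_one_iff cs sub (k + 1) hk1] at hF1
    rw [List.drop_eq_getElem_cons hk, List.infix_cons_iff]
    rw [List.drop_eq_getElem_cons hk] at hno
    tauto
  · obtain ⟨hge, hpreF, hminF⟩ := PySem.Chars.findFrom_natCast_spec cs sub (k + 1) hk1 hF1
    set F := PySem.Chars.findFrom cs sub ((k + 1 : Nat) : Int) with hF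
    have h0 : 0 ≤ F := le_trans (by positivity) hge
    have heq : PySem.Chars.findFrom cs sub (k : Int) = (F.toNat : Int) := by
      refine pvFindFromUniq cs sub k F.toNat (by omega) (by omega) hpreF ?_
      intro j hj1 hj2
      rcases Nat.eq_or_lt_of_le hj1 with h | h
      · rw [← h]; exact hno
      · exact hminF j h hj2
    rw [heq]; omega

theorem pvFindFromEnd (cs sub : List Char) (hs : sub ≠ []) :
    PySem.Chars.findFrom cs sub (cs.length : Int) = -1 := by
  rw [PySem.Chars.findFrom_natCast_eq_neg_one_iff cs sub cs.length le_rfl]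
  rw [List.drop_length]
  simpa using hs

-- A's jump target after a line comment reaching position i
def pvLineT (cs : List Char) (i : Int) : Int :=
  if PySem.Chars.findFrom cs ['\n'] i ≠ -1 then PySem.Chars.findFrom cs ['\n'] i else (cs.length : Int)

-- both scanners are finished past the end of the input
theorem pvExit (cs : List Char) (k : Nat) (hk : cs.length ≤ k) :
    ((∀ q f g, cs.length - k < f → cs.length - k < g →
        loopB cs f 0 q (k : Int) = findA cs g (k : Int)) ∧
     (∀ q f g h, cs.length - k < f → cs.length - k ≤ g → cs.length - k < h →
        loopB cs f 1 q (k : Int) =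
          (match skipLoopA cs h q (k : Int) with | none => none | some j => findA cs g j)) ∧
     (∀ q f g, k ≤ cs.length → cs.length - k < f → cs.length - k < g →
        loopB cs f 2 q (k : Int) = findA cs g (pvLineT cs (k : Int))) ∧
     (∀ q f g, k ≤ cs.length → cs.length - k < f → cs.length - k < g →
        loopB cs f 3 q (k : Int) =
          (if PySem.Chars.findFrom cs ['*', '/'] (k : Int) = -1 then none
           else findA cs g (PySem.Chars.findFrom cs ['*', '/'] (k : Int) + 2)))) := by
  have hge : ¬ ((k : Int) < (cs.length : Int)) := by omega
  refine ⟨?_, ?_, ?_, ?_⟩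
  · intro q f g hf hg
    obtain ⟨f', rfl⟩ : ∃ f', f = f' + 1 := ⟨f - 1, by omega⟩
    obtain ⟨g', rfl⟩ : ∃ g', g = g' + 1 := ⟨g - 1, by omega⟩
    rw [loopB, findA, if_neg hge, if_neg hge]
  · intro q f g h hf hg hh
    obtain ⟨f', rfl⟩ : ∃ f', f = f' + 1 := ⟨f - 1, by omega⟩
    obtain ⟨h', rfl⟩ : ∃ h', h = h' + 1 := ⟨h - 1, by omega⟩
    rw [loopB, skipLoopA, if_neg hge, if_neg hge]
  · intro q f g hkle hf hg
    have hkeq : k = cs.length := by omega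
    subst hkeq
    obtain ⟨f', rfl⟩ : ∃ f', f = f' + 1 := ⟨f - 1, by omega⟩
    obtain ⟨g', rfl⟩ : ∃ g', g = g' + 1 := ⟨g - 1, by omega⟩
    rw [loopB, if_neg hge]
    unfold pvLineT
    rw [pvFindFromEnd cs ['\n'] (by simp), if_neg (by simp), findA, if_neg (by omega)]
  · intro q f g hkle hf hg
    have hkeq : k = cs.length := by omega
    subst hkeq
    obtain ⟨f', rfl⟩ : ∃ f', f = f' + 1 := ⟨f - 1, by omega⟩
    rw [loopB, if_neg hge, pvFindFromEnd cs ['*', '/'] (by simp), if_pos rfl]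

-- the coupled invariant: B's four states against A's scanner
theorem pvMain (cs : List Char) (m : Nat) : ∀ k : Nat, cs.length - k ≤ m →
    ((∀ q f g, cs.length - k < f → cs.length - k < g →
        loopB cs f 0 q (k : Int) = findA cs g (k : Int)) ∧
     (∀ q f g h, cs.length - k < f → cs.length - k ≤ g → cs.length - k < h →
        loopB cs f 1 q (k : Int) =
          (match skipLoopA cs h q (k : Int) with | none => none | some j => findA cs g j)) ∧
     (∀ q f g, k ≤ cs.length → cs.length - k < f → cs.length - k < g →
        loopB cs f 2 q (k : Int) = findA cs g (pvLineT cs (k : Int))) ∧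
     (∀ q f g, k ≤ cs.length → cs.length - k < f → cs.length - k < g →
        loopB cs f 3 q (k : Int) =
          (if PySem.Chars.findFrom cs ['*', '/'] (k : Int) = -1 then none
           else findA cs g (PySem.Chars.findFrom cs ['*', '/'] (k : Int) + 2)))) := by
  induction m with
  | zero => intro k hm; exact pvExit cs k (by omega)
  | succ m ih =>
    intro k hm
    by_cases hk : k < cs.length
    case neg => exact pvExit cs k (by omega)
    case pos =>
    have hklt : (k : Int) < (cs.length : Int) := by omega
    have hck : PySem.List.pyGetD cs (k : Int) ' ' = cs[k] := by
      rw [PySem.List.pyGetD_natCast, List.getD_eq_getElem cs ' ' hk]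
    have hcast1 : ((k : Int) + 1) = ((k + 1 : Nat) : Int) := by push_cast; ring
    have hcast2 : ((k : Int) + 2) = ((k + 2 : Nat) : Int) := by push_cast; ring
    refine ⟨?_, ?_, ?_, ?_⟩
    -- ============== state NORMAL ==============
    · intro q f g hf hg
      obtain ⟨f', rfl⟩ : ∃ f', f = f' + 1 := ⟨f - 1, by omega⟩
      obtain ⟨g', rfl⟩ : ∃ g', g = g' + 1 := ⟨g - 1, by omega⟩
      rw [loopB, findA, if_pos hklt, if_pos hklt, if_pos rfl, hck]
      by_cases hA : cs[k] = '/' ∧ ((k : Int) + 1) < (cs.length : Int) ∧ PySem.List.pyGetD cs ((k : Int) + 1) ' ' = '/'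
      · rw [if_pos hA, if_pos hA]
        have hklen1 : k + 1 < cs.length := by have := hA.2.1; omega
        rw [hcast2]
        exact (ih (k + 2) (by omega)).2.2.1 q f' g' (by omega) (by omega) (by omega)
      · rw [if_neg hA, if_neg hA]
        by_cases hB : cs[k] = '/' ∧ ((k : Int) + 1) < (cs.length : Int) ∧ PySem.List.pyGetD cs ((k : Int) + 1) ' ' = '*'
        · rw [if_pos hB, if_pos hB]
          have hklen1 : k + 1 < cs.length := by have := hB.2.1; omega
          rw [hcast2]
          exact (ih (k + 2) (by omega)).2.2.2 q f' g' (by omega) (by omega) (by omega)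
        · rw [if_neg hB, if_neg hB]
          by_cases hQ : cs[k] = '"' ∨ cs[k] = '\''
          · have hS : ¬ (cs[k] = ';' ∨ cs[k] = '{') := by rcases hQ with h | h <;> simp [h]
            rw [if_neg hS, if_pos hQ, if_pos hQ]
            have hss : skipStringA cs g' ((k : Int)) = skipLoopA cs g' cs[k] ((k : Int) + 1) := by
              unfold skipStringA
              rw [PySem.List.pyGet?_natCast, List.getElem?_eq_getElem hk]
            rw [hss, hcast1]
            exact (ih (k + 1) (by omega)).2.1 cs[k] f' g' g' (by omega) (by omega) (by omega)
          · rw [if_neg hQ, if_neg hQ]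
            by_cases hS : cs[k] = ';' ∨ cs[k] = '{'
            · rw [if_pos hS, if_pos hS]
            · rw [if_neg hS, if_neg hS, hcast1]
              exact (ih (k + 1) (by omega)).1 q f' g' (by omega) (by omega)
    -- ============== state STRING ==============
    · intro q f g h hf hg hh
      obtain ⟨f', rfl⟩ : ∃ f', f = f' + 1 := ⟨f - 1, by omega⟩
      obtain ⟨h', rfl⟩ : ∃ h', h = h' + 1 := ⟨h - 1, by omega⟩
      rw [loopB, if_pos hklt, if_neg (by decide), if_pos rfl]
      conv_rhs => rw [skipLoopA]
      rw [if_pos hklt, hck]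
      by_cases hbs : cs[k] = '\\'
      · rw [if_pos hbs, if_pos hbs, hcast2]
        exact (ih (k + 2) (by omega)).2.1 q f' g h' (by omega) (by omega) (by omega)
      · rw [if_neg hbs, if_neg hbs]
        by_cases hq : cs[k] = q
        · rw [if_pos hq, if_pos hq]
          dsimp only
          rw [hcast1]
          exact (ih (k + 1) (by omega)).1 q f' g (by omega) (by omega)
        · rw [if_neg hq, if_neg hq, hcast1]
          exact (ih (k + 1) (by omega)).2.1 q f' g h' (by omega) (by omega) (by omega)
    -- ============== state LINE_COMMENT ==============
    · intro q f g hkle hf hg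
      obtain ⟨f', rfl⟩ : ∃ f', f = f' + 1 := ⟨f - 1, by omega⟩
      obtain ⟨g', rfl⟩ : ∃ g', g = g' + 1 := ⟨g - 1, by omega⟩
      rw [loopB, if_pos hklt, if_neg (by decide), if_neg (by decide), if_pos rfl, hck]
      by_cases hnl : cs[k] = '\n'
      · rw [if_pos hnl]
        have hpre : ['\n'] <+: cs.drop k :=
          pvPrefixOne.mpr (by rw [List.getElem?_eq_getElem hk, hnl])
        have hLT : pvLineT cs ((k : Int)) = (k : Int) := by
          unfold pvLineT
          rw [pvFindFromHit cs ['\n'] k (by omega) hpre, if_pos (by omega)]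
        rw [hLT]
        conv_rhs => rw [findA]
        rw [if_pos hklt, hck, hnl]
        rw [if_neg (by simp), if_neg (by simp), if_neg (by simp), if_neg (by simp), hcast1]
        exact (ih (k + 1) (by omega)).1 q f' g' (by omega) (by omega)
      · rw [if_neg hnl]
        have hno : ¬ (['\n'] <+: cs.drop k) := by
          rw [pvPrefixOne, List.getElem?_eq_getElem hk]
          exact fun h => hnl (Option.some_inj.mp h)
        have hLT : pvLineT cs ((k : Int)) = pvLineT cs ((k : Int) + 1) := by
          unfold pvLineT
          rw [pvFindFromStep cs ['\n'] k hk hno]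
        rw [hLT, hcast1]
        exact (ih (k + 1) (by omega)).2.2.1 q f' (g' + 1) (by omega) (by omega) (by omega)
    -- ============== state BLOCK_COMMENT ==============
    · intro q f g hkle hf hg
      obtain ⟨f', rfl⟩ : ∃ f', f = f' + 1 := ⟨f - 1, by omega⟩
      rw [loopB, if_pos hklt, if_neg (by decide), if_neg (by decide), if_neg (by decide), hck]
      by_cases hBl : cs[k] = '*' ∧ ((k : Int) + 1) < (cs.length : Int) ∧ PySem.List.pyGetD cs ((k : Int) + 1) ' ' = '/'
      · rw [if_pos hBl]
        have hklen1 : k + 1 < cs.length := by have := hBl.2.1; omega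
        have hck1 : PySem.List.pyGetD cs ((k : Int) + 1) ' ' = cs[k + 1] := by
          rw [hcast1, PySem.List.pyGetD_natCast, List.getD_eq_getElem cs ' ' hklen1]
        have hpre : ['*', '/'] <+: cs.drop k :=
          pvPrefixTwo.mpr ⟨by rw [List.getElem?_eq_getElem hk, hBl.1],
            by rw [List.getElem?_eq_getElem hklen1, ← hck1, hBl.2.2]⟩
        rw [pvFindFromHit cs ['*', '/'] k (by omega) hpre, if_neg (by omega), hcast2]
        exact (ih (k + 2) (by omega)).1 q f' g (by omega) (by omega)
      · rw [if_neg hBl]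
        have hno : ¬ (['*', '/'] <+: cs.drop k) := by
          rw [pvPrefixTwo]
          rintro ⟨h1, h2⟩
          apply hBl
          obtain ⟨hlt2, he2⟩ := List.getElem?_eq_some_iff.mp h2
          have hck' : cs[k] = '*' := by
            rw [List.getElem?_eq_getElem hk] at h1
            exact Option.some_inj.mp h1
          refine ⟨hck', by omega, ?_⟩
          rw [hcast1, PySem.List.pyGetD_natCast, List.getD_eq_getElem cs ' ' hlt2]
          exact he2
        rw [pvFindFromStep cs ['*', '/'] k hk hno, hcast1]
        exact (ih (k + 1) (by omega)).2.2.2 q f' g (by omega) (by omega) (by omega)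

-- ===== VERDICT (by name: the statement is the Claim_ definition above) =====
theorem find_first_special_char_py_spec : Claim_equal_find_first_special_char_py := by
  intro text idx _ hpre
  unfold Pre_find_first_special_char_py at hpre
  unfold Spec_find_first_special_char_py find_first_special_char_py find_first_special_char_py_alt
  obtain ⟨k, rfl⟩ : ∃ k : Nat, idx = (k : Int) := ⟨idx.toNat, by omega⟩
  exact ((pvMain text.toList (text.toList.length) k (by omega)).1 ' '
    (text.toList.length + 1) (text.toList.length + 1) (by omega) (by omega)).symm
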